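-- pv_equiv track=rewrite | github.com/guillermoim/planning_with_LFA | formula_interpreter/datasets/supervised/optimal/dataset.py | _arity_of
-- ===== SOURCE A (Python) =====
-- def _arity_of(predicate, facts, goals, states):
--     def find_arity(preds):
--         for (other_predicate, arguments) in preds:
--             if predicate == other_predicate:
--                 return len(arguments)
--     arity = find_arity(facts)
--     if arity != None:
--         return arity
--     arity = find_arity(goals)
--     if arity != None:
--         return arity
--     for (_, state) in states:
--         arity = find_arity(state)
--         if arity != None:
--             return arity
--     return 0
-- ===== SOURCE B (Python) =====
-- def _arity_of(predicate, facts, goals, states):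
--     # Build a first-occurrence arity index for EVERY predicate, then answer
--     # with a single dictionary lookup (no early-return scanning).
--     index = {}
--     for group in (facts, goals, *(state for _, state in states)):
--         for other, args in group:
--             index.setdefault(other, len(args))
--     return index.get(predicate, 0)
-- ===== Notes on version B (the rewrite author's own statement) =====
-- stated objective: alternative
-- what changed: Instead of three staged first-match scans with a None-sentinel helper and early returns, B builds a complete first-occurrence predicate->arity dictionary over facts, goals and all states in one pass and answers with a single dict.get lookup.
import Mathlib
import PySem

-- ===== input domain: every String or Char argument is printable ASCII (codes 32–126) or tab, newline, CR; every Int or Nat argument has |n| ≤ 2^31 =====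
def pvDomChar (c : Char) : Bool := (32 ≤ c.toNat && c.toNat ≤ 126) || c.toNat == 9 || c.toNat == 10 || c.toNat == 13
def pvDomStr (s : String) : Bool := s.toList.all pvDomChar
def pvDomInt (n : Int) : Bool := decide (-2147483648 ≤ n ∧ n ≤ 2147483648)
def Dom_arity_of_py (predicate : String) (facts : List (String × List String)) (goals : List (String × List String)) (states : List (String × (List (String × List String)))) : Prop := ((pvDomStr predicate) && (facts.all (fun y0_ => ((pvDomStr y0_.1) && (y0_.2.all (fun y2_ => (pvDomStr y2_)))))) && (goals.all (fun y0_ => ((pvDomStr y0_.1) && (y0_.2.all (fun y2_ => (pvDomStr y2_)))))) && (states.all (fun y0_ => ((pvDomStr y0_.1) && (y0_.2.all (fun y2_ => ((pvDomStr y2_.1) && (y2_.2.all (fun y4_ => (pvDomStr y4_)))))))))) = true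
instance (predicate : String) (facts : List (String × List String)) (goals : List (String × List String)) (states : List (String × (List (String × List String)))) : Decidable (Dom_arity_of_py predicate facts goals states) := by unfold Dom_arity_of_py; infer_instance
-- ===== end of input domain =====

-- B replaces A's three staged first-match scans (with a None-sentinel helper) by building a
-- complete first-occurrence predicate->arity dictionary once and answering with one lookup
-- (objective: alternative; same cost).


-- ===== PORT A =====
-- find_arity: first matching predicate's arity, None otherwise
def pvFindArity (predicate : String) : List (String × List String) → Option Int
  | [] => none
  | (other_predicate, arguments) :: rest =>
    if predicate == other_predicate then some (arguments.length : Int)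
    else pvFindArity predicate rest

-- the 'for (_, state) in states' loop of A, with the trailing 'return 0'
def pvStatesLoop (predicate : String) : List (String × (List (String × List String))) → Int
  | [] => 0
  | (_, state) :: rest =>
    match pvFindArity predicate state with
    | some a => a
    | none => pvStatesLoop predicate rest

def arity_of_py (predicate : String) (facts : List (String × List String)) (goals : List (String × List String)) (states : List (String × (List (String × List String)))) : Int :=
  match pvFindArity predicate facts with
  | some a => a
  | none =>
    match pvFindArity predicate goals with
    | some a => a
    | none => pvStatesLoop predicate states

-- ===== PORT B =====
-- inner loop of B: index.setdefault(other, len(args)) over one predicate group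
def pvIndexGroup (d : PySem.Dict String Int) (g : List (String × List String)) : PySem.Dict String Int :=
  g.foldl (fun d p => d.setdefault p.1 (p.2.length : Int)) d

def arity_of_py_alt (predicate : String) (facts : List (String × List String)) (goals : List (String × List String)) (states : List (String × (List (String × List String)))) : Int :=
  let groups := [facts, goals] ++ states.map (·.2)
  let index := groups.foldl pvIndexGroup PySem.Dict.empty
  index.getD predicate 0

-- ===== PRECONDITION & SPEC =====
def Spec_arity_of_py (predicate : String) (facts : List (String × List String)) (goals : List (String × List String)) (states : List (String × (List (String × List String)))) (out : Int) : Prop := out = arity_of_py_alt predicate facts goals states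
instance (predicate : String) (facts : List (String × List String)) (goals : List (String × List String)) (states : List (String × (List (String × List String)))) (out : Int) : Decidable (Spec_arity_of_py predicate facts goals states out) := by unfold Spec_arity_of_py; infer_instance

-- ===== CLAIM (what is proved, stated in full; the proofs are below) =====
def Claim_equal_arity_of_py : Prop := ∀ (predicate : String) (facts : List (String × List String)) (goals : List (String × List String)) (states : List (String × (List (String × List String)))), Dom_arity_of_py predicate facts goals states → Spec_arity_of_py predicate facts goals states (arity_of_py predicate facts goals states)

-- ===== LEMMAS AND PROOFS =====

-- one group's index pass: the lookup afterwards is the old value, else the group's first match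
lemma get?_pvIndexGroup (p : String) (g : List (String × List String)) :
    ∀ d : PySem.Dict String Int,
      (pvIndexGroup d g).get? p =
        (match d.get? p with
         | some v => some v
         | none => pvFindArity p g) := by
  induction g with
  | nil =>
    intro d
    simp only [pvIndexGroup, List.foldl_nil]
    cases d.get? p <;> rfl
  | cons h t ih =>
    intro d
    obtain ⟨o, args⟩ := h
    have step : pvIndexGroup d ((o, args) :: t)
        = pvIndexGroup (d.setdefault o (args.length : Int)) t := rfl
    rw [step, ih]
    by_cases hc : p = o
    · subst hc
      rw [PySem.Dict.get?_setdefault_self]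
      cases hd : d.get? p <;>
        simp [pvFindArity]
    · rw [PySem.Dict.get?_setdefault_of_ne d _ hc]
      cases hd : d.get? p
      · simp only [pvFindArity, beq_iff_eq, if_neg hc]
      · rfl

-- folding the index over a list of groups: lookup = old value, else first match over the groups
lemma get?_foldl_pvIndexGroup (p : String) (gs : List (List (String × List String))) :
    ∀ d : PySem.Dict String Int,
      (gs.foldl pvIndexGroup d).get? p =
        (match d.get? p with
         | some v => some v
         | none => gs.findSome? (pvFindArity p)) := by
  induction gs with
  | nil =>
    intro d
    simp only [List.foldl_nil, List.findSome?_nil]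
    cases d.get? p <;> rfl
  | cons g t ih =>
    intro d
    rw [List.foldl_cons, ih, get?_pvIndexGroup]
    cases hd : d.get? p
    · cases hg : pvFindArity p g <;> simp [List.findSome?, hg]
    · rfl

-- A's states loop is the first match over the states' predicate lists, defaulting to 0
lemma pvStatesLoop_eq_findSome (p : String) (states : List (String × (List (String × List String)))) :
    pvStatesLoop p states = ((states.map (·.2)).findSome? (pvFindArity p)).getD 0 := by
  induction states with
  | nil => simp [pvStatesLoop]
  | cons h t ih =>
    obtain ⟨n, st⟩ := h
    cases hg : pvFindArity p st <;>
      simp [pvStatesLoop, hg, ih]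

-- ===== VERDICT (by name: the statement is the Claim_ definition above) =====
theorem arity_of_py_spec : Claim_equal_arity_of_py := by
  intro predicate facts goals states _
  unfold Spec_arity_of_py arity_of_py arity_of_py_alt
  simp only [PySem.Dict.getD, get?_foldl_pvIndexGroup]
  rw [pvStatesLoop_eq_findSome]
  simp only [PySem.Dict.get?_empty]
  cases hf : pvFindArity predicate facts <;>
    cases hg : pvFindArity predicate goals <;>
      simp [List.findSome?, hf, hg]
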